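-- pv_equiv track=rewrite | github.com/WonyJeong/algorithm-study | wndnjs9878/soma_study/bj-2502.py | solution
-- ===== SOURCE A (Python) =====
-- def fibo(D):
--     '''
--     A : fibonacci[D-3]
--     B : fibonacci[D-2]
--     '''
--     temp = [i for i in range(D)]
--     temp[0] = 1
--     temp[1] = 1
--     for i in range(2,D):
--         temp[i] = temp[i-1] + temp[i-2]
--     A = temp[D-3]
--     B = temp[D-2]
--     AandB = [A,B]
--     return AandB
--
-- def solution(D, K):
--     frontA, frontB = fibo(D)
--     A = 1
--     forB = (K - frontA*A) % frontB
--     while forB != 0 :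
--         A += 1
--         forB = (K - frontA*A) % frontB
--     B = (K - frontA*A) // frontB
--     result = [A, B]
--     return result
-- ===== SOURCE B (Python) =====
-- def solution(D, K):
--     # fibonacci pair by two-variable iteration
--     a, b = 1, 1
--     for _ in range(D - 3):
--         a, b = b, a + b
--     # modular inverse of a mod b by extended Euclid (gcd(a,b)=1)
--     old_r, r = a, b
--     old_s, s = 1, 0
--     while r != 0:
--         q = old_r // r
--         old_r, r = r, old_r - q * r
--         old_s, s = s, old_s - q * s
--     A = (K * old_s) % b
--     if A == 0:
--         A = b
--     B = (K - a * A) // b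
--     return [A, B]
-- ===== Notes on version B (the rewrite author's own statement) =====
-- stated objective: faster
-- what changed: A finds the coefficient by linearly trying A = 1, 2, ... until (K - frontA*A) % frontB == 0 (up to fib(D-2) iterations) and builds the fibonacci pair via a length-D list; B computes A directly as the smallest positive representative of K * inv(frontA) mod frontB via the extended Euclidean algorithm, and builds the fibonacci pair with two variables.
import Mathlib
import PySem

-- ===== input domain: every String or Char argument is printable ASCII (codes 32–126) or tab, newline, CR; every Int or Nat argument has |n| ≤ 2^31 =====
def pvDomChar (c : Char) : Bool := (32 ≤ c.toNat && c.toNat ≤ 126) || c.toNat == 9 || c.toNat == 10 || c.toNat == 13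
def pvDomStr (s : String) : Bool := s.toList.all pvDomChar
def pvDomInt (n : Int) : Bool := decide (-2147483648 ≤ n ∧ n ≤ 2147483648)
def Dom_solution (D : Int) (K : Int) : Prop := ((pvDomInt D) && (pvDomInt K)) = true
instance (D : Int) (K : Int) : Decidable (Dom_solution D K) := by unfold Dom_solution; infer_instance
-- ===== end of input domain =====

-- B replaces A's linear search for the coefficient A (trying A = 1, 2, … until
-- (K - frontA*A) % frontB == 0) by a modular inverse computed with the extended
-- Euclidean algorithm, and builds the fibonacci pair with two variables instead of a list.

-- ===== PORT A =====
-- body of 'for i in range(2, D): temp[i] = temp[i-1] + temp[i-2]'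
def stepA (t : List Int) (i : Int) : List Int :=
  PySem.List.pySetD t i (PySem.List.pyGetD t (i-1) 0 + PySem.List.pyGetD t (i-2) 0)

-- fibo(D): builds the list temp, returns (temp[D-3], temp[D-2]) (negative indices wrap)
def fiboA (D : Int) : Int × Int :=
  let temp := PySem.List.pyRange 0 D 1
  let temp := PySem.List.pySetD temp 0 1
  let temp := PySem.List.pySetD temp 1 1
  let temp := (PySem.List.pyRange 2 D 1).foldl stepA temp
  (PySem.List.pyGetD temp (D-3) 0, PySem.List.pyGetD temp (D-2) 0)

-- the 'while forB != 0: A += 1' loop; fuel only makes it total (never exhausted under Pre_)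
def solLoopA (frontA frontB K A : Int) : Nat → Int
  | 0 => A
  | fuel+1 =>
    if PySem.Int.mod (K - frontA*A) frontB ≠ 0 then
      solLoopA frontA frontB K (A+1) fuel
    else A

def solution (D : Int) (K : Int) : List Int :=
  let p := fiboA D
  let frontA := p.1
  let frontB := p.2
  let A := solLoopA frontA frontB K 1 frontB.toNat
  let B := PySem.Int.floordiv (K - frontA*A) frontB
  [A, B]

-- ===== PORT B =====
-- fibonacci pair by two-variable iteration (Source B's for-loop over range(D-3))
def fibIterB (D : Int) : Int × Int :=
  (PySem.List.pyRange 0 (D-3) 1).foldl (fun (p : Int × Int) _ => (p.2, p.1 + p.2)) (1, 1)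

-- extended Euclid (Source B's while loop); fuel only makes it total (|r| shrinks every
-- step, so fuel = |r|+1 is never exhausted)
def egcdB (oldr r olds s : Int) : Nat → Int × Int
  | 0 => (oldr, olds)
  | fuel+1 =>
    if r = 0 then (oldr, olds)
    else
      let q := PySem.Int.floordiv oldr r
      egcdB r (oldr - q*r) s (olds - q*s) fuel

def solution_alt (D : Int) (K : Int) : List Int :=
  let p := fibIterB D
  let a := p.1
  let b := p.2
  let inv := (egcdB a b 1 0 (b.natAbs + 1)).2
  let A0 := PySem.Int.mod (K * inv) b
  let A := if A0 = 0 then b else A0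
  let B := PySem.Int.floordiv (K - a*A) b
  [A, B]

-- ===== PRECONDITION & SPEC =====
-- Pre_ excludes exactly D ≤ 1, where the Python A raises IndexError (at temp[0]=1 or temp[1]=1).
def Pre_solution (D : Int) (K : Int) : Prop := 2 ≤ D
instance (D : Int) (K : Int) : Decidable (Pre_solution D K) := by unfold Pre_solution; infer_instance
def pvWitness_solution : Int × Int := (7, 100)

def Spec_solution (D : Int) (K : Int) (out : List Int) : Prop := out = solution_alt D K
instance (D : Int) (K : Int) (out : List Int) : Decidable (Spec_solution D K out) := by unfold Spec_solution; infer_instance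

-- ===== CLAIM (what is proved, stated in full; the proofs are below) =====
def Claim_equal_solution : Prop := ∀ (D : Int) (K : Int), Dom_solution D K → Pre_solution D K → Spec_solution D K (solution D K)

-- ===== LEMMAS AND PROOFS =====

def Fib : Nat → Int
  | 0 => 1
  | 1 => 1
  | n+2 => Fib (n+1) + Fib n

theorem Fib_pos : ∀ n, 1 ≤ Fib n := by
  intro n
  induction n using Nat.strong_induction_on with
  | _ n ih =>
    match n with
    | 0 => simp [Fib]
    | 1 => simp [Fib]
    | n+2 =>
      have h1 := ih (n+1) (by omega)
      have h2 := ih n (by omega)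
      simp only [Fib]; omega

theorem Fib_gcd (n : Nat) : Int.gcd (Fib n) (Fib (n+1)) = 1 := by
  induction n with
  | zero => decide
  | succ n ih =>
    show Int.gcd (Fib (n+1)) (Fib (n+1) + Fib n) = 1
    have h : Fib (n+1) + Fib n = Fib n + 1 * Fib (n+1) := by ring
    rw [h, Int.gcd_add_mul_right_right, Int.gcd_comm]
    exact ih

-- B's fibonacci fold computes (Fib n, Fib (n+1))
theorem fibfold (n : Nat) :
    (PySem.List.pyRange 0 (n : Int) 1).foldl (fun (p : Int × Int) _ => (p.2, p.1 + p.2)) (1, 1)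
      = (Fib n, Fib (n+1)) := by
  induction n with
  | zero => simp [PySem.List.pyRange_one_eq_nil, Fib]
  | succ n ih =>
    have hc : ((n+1 : Nat) : Int) = (n : Int) + 1 := by push_cast; ring
    rw [hc, PySem.List.pyRange_one_succ_right (by positivity), List.foldl_append, ih]
    simp [Fib, add_comm]

theorem fibIterB_eq (D : Int) (hD : 2 ≤ D) :
    fibIterB D = (Fib (D-3).toNat, Fib ((D-3).toNat + 1)) := by
  unfold fibIterB
  by_cases h3 : 3 ≤ D
  · have hc : D - 3 = (((D-3).toNat : Nat) : Int) := by omega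
    conv_lhs => rw [hc]
    exact fibfold (D-3).toNat
  · have h2 : D = 2 := by omega
    subst h2
    decide

-- A's fold invariant: after processing range(2, 2+m), entries 0..2+m-1 hold Fib
theorem fiboA_fold (D : Int) (hD : 2 ≤ D) (m : Nat) (hm : 2 + (m : Int) ≤ D) :
    ((PySem.List.pyRange 2 (2 + (m : Int)) 1).foldl stepA
        (PySem.List.pySetD (PySem.List.pySetD (PySem.List.pyRange 0 D 1) 0 1) 1 1)).length = D.toNat ∧
    ∀ j : Nat, j < 2 + m →
      ((PySem.List.pyRange 2 (2 + (m : Int)) 1).foldl stepA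
        (PySem.List.pySetD (PySem.List.pySetD (PySem.List.pyRange 0 D 1) 0 1) 1 1)).getD j 0 = Fib j := by
  induction m with
  | zero =>
    rw [show (2 + ((0:Nat) : Int)) = 2 by norm_num, PySem.List.pyRange_one_eq_nil (le_refl 2)]
    simp only [List.foldl_nil]
    have hl : (PySem.List.pyRange 0 D 1).length = D.toNat := by
      rw [PySem.List.length_pyRange_one]; omega
    have hlen : (PySem.List.pySetD (PySem.List.pySetD (PySem.List.pyRange 0 D 1) 0 1) 1 1).length = D.toNat := by
      rw [PySem.List.length_pySetD, PySem.List.length_pySetD, hl]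
    refine ⟨hlen, ?_⟩
    intro j hj
    rw [PySem.List.pySetD_of_nonneg _ _ (by norm_num), PySem.List.pySetD_of_nonneg _ _ (by norm_num)]
    rw [PySem.List.pySetD_of_nonneg _ _ (by norm_num), PySem.List.pySetD_of_nonneg _ _ (by norm_num)] at hlen
    simp only [Int.toNat_one, Int.toNat_zero] at hlen ⊢
    have hlen2 : 2 ≤ (((PySem.List.pyRange 0 D 1).set 0 1).set 1 1).length := by omega
    simp only [List.length_set] at hlen2
    have hp0 : 0 < (PySem.List.pyRange 0 D 1).length := by omega
    have hp1 : 1 < (PySem.List.pyRange 0 D 1).length := by omega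
    interval_cases j
    · simp [List.getD_eq_getElem?_getD, List.getElem?_set, hp0, Fib, show (0:Int) < D by omega]
    · simp [List.getD_eq_getElem?_getD, List.getElem?_set, hp1, Fib, show (1:Int) < D by omega]
  | succ m ih =>
    have hm' : 2 + (m : Int) ≤ D := by push_cast at hm ⊢; omega
    obtain ⟨ihl, ihv⟩ := ih hm'
    have hc : (2 + ((m+1 : Nat) : Int)) = (2 + (m : Int)) + 1 := by push_cast; ring
    rw [hc, PySem.List.pyRange_one_succ_right (by omega), List.foldl_append]
    simp only [List.foldl_cons, List.foldl_nil]
    set T := (PySem.List.pyRange 2 (2 + (m : Int)) 1).foldl stepA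
        (PySem.List.pySetD (PySem.List.pySetD (PySem.List.pyRange 0 D 1) 0 1) 1 1) with hT
    unfold stepA
    have e1 : (2 + (m : Int)) - 1 = ((m+1 : Nat) : Int) := by push_cast; ring
    have e2 : (2 + (m : Int)) - 2 = ((m : Nat) : Int) := by push_cast; ring
    have e3 : (2 + (m : Int)) = ((m+2 : Nat) : Int) := by push_cast; ring
    rw [e1, e2, PySem.List.pyGetD_natCast, PySem.List.pyGetD_natCast]
    rw [ihv (m+1) (by omega), ihv m (by omega)]
    rw [e3, PySem.List.pySetD_of_nonneg _ _ (by omega)]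
    have e4 : (((m+2 : Nat) : Int)).toNat = m + 2 := by omega
    rw [e4]
    have hm2 : m + 2 < D.toNat := by omega
    constructor
    · rw [List.length_set, ihl]
    · intro j hj
      rw [List.getD_eq_getElem?_getD, List.getElem?_set]
      by_cases hje : m + 2 = j
      · subst hje
        rw [if_pos rfl, if_pos (by omega)]
        show Fib (m+1) + Fib m = Fib (m+2)
        simp [Fib]
      · rw [if_neg hje]
        rw [← List.getD_eq_getElem?_getD]
        exact ihv j (by omega)

theorem fiboA_eq (D : Int) (hD : 2 ≤ D) :
    fiboA D = (Fib (D-3).toNat, Fib ((D-3).toNat + 1)) := by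
  by_cases h3 : 3 ≤ D
  · unfold fiboA
    have hm : 2 + ((D.toNat - 2 : Nat) : Int) ≤ D := by omega
    have hfull : (2 + ((D.toNat - 2 : Nat) : Int)) = D := by omega
    obtain ⟨hl, hv⟩ := fiboA_fold D hD (D.toNat - 2) hm
    rw [hfull] at hl hv
    have hA : PySem.List.pyGetD ((PySem.List.pyRange 2 D 1).foldl stepA
        (PySem.List.pySetD (PySem.List.pySetD (PySem.List.pyRange 0 D 1) 0 1) 1 1)) (D-3) 0
        = Fib (D-3).toNat := by
      rw [PySem.List.pyGetD_eq_getElem _ _ (by omega) (by rw [hl]; push_cast; omega)]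
      have hb' := hv (D-3).toNat (by omega)
      rwa [List.getD_eq_getElem?_getD, List.getElem?_eq_getElem (by rw [hl]; omega), Option.getD_some] at hb'
    have hB : PySem.List.pyGetD ((PySem.List.pyRange 2 D 1).foldl stepA
        (PySem.List.pySetD (PySem.List.pySetD (PySem.List.pyRange 0 D 1) 0 1) 1 1)) (D-2) 0
        = Fib ((D-3).toNat + 1) := by
      rw [PySem.List.pyGetD_eq_getElem _ _ (by omega) (by rw [hl]; push_cast; omega)]
      have hb' := hv ((D-3).toNat + 1) (by omega)
      rw [List.getD_eq_getElem?_getD, List.getElem?_eq_getElem (by rw [hl]; omega), Option.getD_some] at hb'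
      convert hb' using 2
      omega
    simp only [hA, hB]
  · have h2 : D = 2 := by omega
    subst h2
    decide

-- extended Euclid invariant
theorem egcdB_spec (a b : Int) : ∀ (fuel : Nat) (oldr r olds s : Int), r.natAbs < fuel →
    1 ≤ oldr → 0 ≤ r → oldr ≡ a * olds [ZMOD b] → r ≡ a * s [ZMOD b] →
    Int.gcd oldr r = Int.gcd a b →
    1 ≤ (egcdB oldr r olds s fuel).1 ∧ ((egcdB oldr r olds s fuel).1).natAbs = Int.gcd a b ∧
      (egcdB oldr r olds s fuel).1 ≡ a * (egcdB oldr r olds s fuel).2 [ZMOD b] := by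
  intro fuel
  induction fuel with
  | zero => intro oldr r olds s hrn; omega
  | succ fuel ih =>
    intro oldr r olds s hrn h1 h2 hc1 hc2 hg
    rw [egcdB]
    by_cases hr : r = 0
    · rw [if_pos hr]
      subst hr
      refine ⟨h1, ?_, hc1⟩
      rw [← hg]
      simp [Int.gcd]
    · rw [if_neg hr]
      have hpos : 0 < r := by omega
      set q := PySem.Int.floordiv oldr r with hq
      have hmod : oldr - q * r = PySem.Int.mod oldr r := by
        have h := PySem.Int.floordiv_mul_add_mod oldr r
        linarith
      have hnn : 0 ≤ oldr - q * r := by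
        rw [hmod]; exact PySem.Int.mod_nonneg (a := oldr) hpos
      have hlt : oldr - q * r < r := by
        rw [hmod]; exact PySem.Int.mod_lt (a := oldr) hpos
      have hc2' : oldr - q * r ≡ a * (olds - q * s) [ZMOD b] := by
        have h := hc1.sub (Int.ModEq.mul_left q hc2)
        have he : a * olds - q * (a * s) = a * (olds - q * s) := by ring
        rwa [he] at h
      have hg' : Int.gcd r (oldr - q * r) = Int.gcd a b := by
        have he : oldr - q * r = oldr + (-q) * r := by ring
        rw [he, Int.gcd_add_mul_right_right, Int.gcd_comm]
        exact hg
      exact ih r (oldr - q * r) s (olds - q * s)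
        (by omega) (by omega) hnn hc2 hc2' hg'

theorem egcdB_inverse (a b : Int) (ha : 1 ≤ a) (hb : 0 ≤ b) (hg : Int.gcd a b = 1) :
    (1 : Int) ≡ a * (egcdB a b 1 0 (b.natAbs + 1)).2 [ZMOD b] := by
  have h := egcdB_spec a b (b.natAbs + 1) a b 1 0 (by omega) ha hb
    (by simpa using Int.ModEq.refl a) (by simp [Int.ModEq]) rfl
  obtain ⟨h1, h2, h3⟩ := h
  rw [hg] at h2
  have hone : (egcdB a b 1 0 (b.natAbs + 1)).1 = 1 := by omega
  rwa [hone] at h3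

-- the while-loop returns the least solution ≥ its start, given enough fuel
theorem solLoopA_eq (c b K : Int) : ∀ (fuel : Nat) (A0 S : Int), A0 ≤ S → S ≤ A0 + fuel →
    PySem.Int.mod (K - c*S) b = 0 →
    (∀ A : Int, A0 ≤ A → A < S → PySem.Int.mod (K - c*A) b ≠ 0) →
    solLoopA c b K A0 fuel = S := by
  intro fuel
  induction fuel with
  | zero =>
    intro A0 S hle hub _ _
    have : S = A0 := by omega
    simp [solLoopA, this]
  | succ fuel ih =>
    intro A0 S hle hub hS hmin
    rw [solLoopA]
    by_cases h0 : PySem.Int.mod (K - c*A0) b = 0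
    · have hAS : A0 = S := by
        by_contra hne
        exact hmin A0 (le_refl A0) (by omega) h0
      rw [if_neg (not_not_intro h0)]
      exact hAS
    · rw [if_pos h0]
      have hlt : A0 < S := by
        rcases eq_or_lt_of_le hle with h | h
        · exact absurd (h ▸ hS) h0
        · exact h
      exact ih (A0+1) S (by omega) (by omega) hS
        (fun A hA1 hA2 => hmin A (by omega) hA2)

-- with an inverse in hand: (K - a*A) % b == 0  ↔  A % b = (K*inv) % b
theorem key_iff (a b K inv : Int) (hb : 0 < b) (hinv : (1 : Int) ≡ a * inv [ZMOD b]) (A : Int) :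
    PySem.Int.mod (K - a*A) b = 0 ↔ A % b = (K * inv) % b := by
  rw [PySem.Int.mod_eq_zero_iff_dvd]
  constructor
  · intro hdvd
    have h1 : a * A ≡ K [ZMOD b] := (Int.modEq_iff_dvd).mpr hdvd
    have h2 : inv * (a * A) ≡ inv * K [ZMOD b] := h1.mul_left inv
    have h3 : (1 : Int) * A ≡ (a * inv) * A [ZMOD b] := hinv.mul_right A
    have h4 : A ≡ K * inv [ZMOD b] := by
      have he1 : (1 : Int) * A = A := by ring
      have he2 : (a * inv) * A = inv * (a * A) := by ring
      have he3 : inv * K = K * inv := by ring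
      rw [he1, he2] at h3
      rw [he3] at h2
      exact h3.trans h2
    exact h4
  · intro h
    have h1 : A ≡ K * inv [ZMOD b] := h
    have h2 : a * A ≡ a * (K * inv) [ZMOD b] := h1.mul_left a
    have h3 : (a * inv) * K ≡ (1 : Int) * K [ZMOD b] := (hinv.symm).mul_right K
    have h4 : a * A ≡ K [ZMOD b] := by
      have he1 : a * (K * inv) = (a * inv) * K := by ring
      have he2 : (1 : Int) * K = K := by ring
      rw [he1] at h2
      rw [he2] at h3
      exact h2.trans h3
    exact (Int.modEq_iff_dvd).mp h4

-- the loop of A equals B's closed-form coefficient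
theorem core (a b K : Int) (ha : 1 ≤ a) (hb : 1 ≤ b) (hg : Int.gcd a b = 1) :
    solLoopA a b K 1 b.toNat
      = (if PySem.Int.mod (K * (egcdB a b 1 0 (b.natAbs + 1)).2) b = 0 then b
         else PySem.Int.mod (K * (egcdB a b 1 0 (b.natAbs + 1)).2) b) := by
  have hbpos : (0 : Int) < b := by omega
  set inv := (egcdB a b 1 0 (b.natAbs + 1)).2 with hinv_def
  have hinv : (1 : Int) ≡ a * inv [ZMOD b] := egcdB_inverse a b ha (by omega) hg
  have hmodeq : PySem.Int.mod (K * inv) b = (K * inv) % b :=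
    PySem.Int.mod_eq_emod_of_pos hbpos
  set r0 := (K * inv) % b with hr0_def
  have hr0nn : 0 ≤ r0 := Int.emod_nonneg _ (by omega)
  have hr0lt : r0 < b := Int.emod_lt_of_pos _ hbpos
  set S : Int := if r0 = 0 then b else r0 with hS_def
  have hSlb : 1 ≤ S := by rw [hS_def]; split_ifs <;> omega
  have hSub : S ≤ b := by rw [hS_def]; split_ifs <;> omega
  have hSmod : S % b = r0 := by
    rw [hS_def]
    split_ifs with h0
    · rw [Int.emod_self]; omega
    · exact Int.emod_eq_of_lt (by omega) (by omega)
  have hfuel : S ≤ 1 + (b.toNat : Int) := by omega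
  have hloop : solLoopA a b K 1 b.toNat = S := by
    apply solLoopA_eq a b K b.toNat 1 S hSlb hfuel
    · rw [key_iff a b K inv hbpos hinv]
      exact hSmod
    · intro A hA1 hA2 hcon
      rw [key_iff a b K inv hbpos hinv] at hcon
      have hAmod : A % b = A := Int.emod_eq_of_lt (by omega) (by omega)
      rw [hAmod] at hcon
      rw [hS_def] at hA2
      split_ifs at hA2 with h0
      · omega
      · omega
  rw [hloop, hS_def, hmodeq]

-- ===== VERDICT (by name: the statement is the Claim_ definition above) =====
theorem solution_spec : Claim_equal_solution := by
  intro D K _ hPre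
  have hD : 2 ≤ D := hPre
  show solution D K = solution_alt D K
  set n := (D-3).toNat with hn
  have hfa : fiboA D = (Fib n, Fib (n+1)) := fiboA_eq D hD
  have hfb : fibIterB D = (Fib n, Fib (n+1)) := fibIterB_eq D hD
  have ha : 1 ≤ Fib n := Fib_pos n
  have hb : 1 ≤ Fib (n+1) := Fib_pos (n+1)
  have hg : Int.gcd (Fib n) (Fib (n+1)) = 1 := Fib_gcd n
  simp only [solution, solution_alt, hfa, hfb]
  rw [core (Fib n) (Fib (n+1)) K ha hb hg]
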